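-- pv_equiv track=rewrite | github.com/Mahbub96/ProblemSolving | python/Machine_Learning/first_linear_regression.py | sequenceMaker
-- ===== SOURCE A (Python) =====
-- def sequenceMaker(l, r):
--     res = 0
--     count = 0
--     while (l % 4 != 0):
--         l -= 1
--         count += 1
--
--     if count == 0:
--         res = l
--     elif count == 1:
--         res = 1
--
--     elif count == 2:
--         res = l + 3
--     elif count == 3:
--         res = 0
--
--     for i in range(l+count+1, r+1):
--
--         if (i % 4 == 0):
--             res = res ^ i
--
--         elif i % 4 == 1:
--             res = res ^ 1
--
--         elif (i % 4 == 2):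
--             res = res ^ (i + 1)
--
--         elif (i % 4 == 3):
--             res = res ^ 0
--
--     return res
-- ===== SOURCE B (Python) =====
-- def sequenceMaker(l, r):
--     # O(1) closed form for the value A computes: the XOR of t(i) for i in [l, r]
--     # where t(i) = [i, 1, i+1, 0][i % 4], plus t(l) alone when r < l.
--     def t(n):
--         m = n % 4
--         if m == 0:
--             return n
--         if m == 1:
--             return 1
--         if m == 2:
--             return n + 1
--         return 0
--
--     def G(n):
--         # XOR of t(i) over one 4-aligned prefix ending at n: each complete
--         # 4-block XORs to 2, the partial block contributes [n, n, 2, 2][n % 4].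
--         q, m = divmod(n, 4)
--         base = 2 if q % 2 == 1 else 0
--         part = n if m < 2 else 2
--         return base ^ part
--
--     if r > l:
--         return t(l) ^ G(r) ^ G(l)
--     return t(l)
-- ===== Notes on version B (the rewrite author's own statement) =====
-- stated objective: faster
-- what changed: A scans every integer from l+1 to r XORing a table value per iteration; B computes the same result in O(1) from a closed-form prefix value G(n) (each aligned 4-block of A's per-element terms XORs to 2, plus a partial-block term), returning t(l) ^ G(r) ^ G(l).
import Mathlib
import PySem

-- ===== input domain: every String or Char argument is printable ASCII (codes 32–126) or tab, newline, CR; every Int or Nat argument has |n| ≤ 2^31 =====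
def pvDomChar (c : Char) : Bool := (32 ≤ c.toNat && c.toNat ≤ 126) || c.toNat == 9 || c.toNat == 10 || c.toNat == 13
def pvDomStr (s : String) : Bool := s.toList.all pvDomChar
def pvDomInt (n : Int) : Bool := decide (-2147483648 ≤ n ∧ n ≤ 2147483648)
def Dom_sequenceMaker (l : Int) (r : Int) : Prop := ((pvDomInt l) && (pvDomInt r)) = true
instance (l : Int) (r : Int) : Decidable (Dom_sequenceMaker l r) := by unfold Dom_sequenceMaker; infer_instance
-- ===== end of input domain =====

-- ===== PORT A =====
-- B replaces A's O(r-l) scan with an O(1) closed form for the same value (return value only; A mutates no argument).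

-- A's while loop: 'while l % 4 != 0: l -= 1; count += 1'; fuel 4 suffices since l % 4 < 4 (guard only, same steps)
def seqWhile : Nat → Int → Int → Int × Int
  | 0, l, count => (l, count)
  | fuel+1, l, count =>
    if PySem.Int.mod l 4 ≠ 0 then seqWhile fuel (l - 1) (count + 1) else (l, count)

-- A's for-loop body
def seqStep (res : Int) (i : Int) : Int :=
  if PySem.Int.mod i 4 = 0 then PySem.Int.bxor res i
  else if PySem.Int.mod i 4 = 1 then PySem.Int.bxor res 1
  else if PySem.Int.mod i 4 = 2 then PySem.Int.bxor res (i + 1)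
  else if PySem.Int.mod i 4 = 3 then PySem.Int.bxor res 0
  else res

def sequenceMaker (l : Int) (r : Int) : Int :=
  let p := seqWhile 4 l 0
  let res : Int :=
    if p.2 = 0 then p.1
    else if p.2 = 1 then 1
    else if p.2 = 2 then p.1 + 3
    else if p.2 = 3 then 0
    else 0
  (PySem.List.pyRange (p.1 + p.2 + 1) (r + 1)).foldl seqStep res

-- ===== PORT B =====
def altT (n : Int) : Int :=
  let m := PySem.Int.mod n 4
  if m = 0 then n else if m = 1 then 1 else if m = 2 then n + 1 else 0

def altG (n : Int) : Int :=
  let q := PySem.Int.floordiv n 4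
  let m := PySem.Int.mod n 4
  let base : Int := if PySem.Int.mod q 2 = 1 then 2 else 0
  let part : Int := if m < 2 then n else 2
  PySem.Int.bxor base part

def sequenceMaker_alt (l : Int) (r : Int) : Int :=
  if r > l then PySem.Int.bxor (PySem.Int.bxor (altT l) (altG r)) (altG l)
  else altT l
-- ===== PRECONDITION & SPEC =====
def Spec_sequenceMaker (l : Int) (r : Int) (out : Int) : Prop := out = sequenceMaker_alt l r
instance (l : Int) (r : Int) (out : Int) : Decidable (Spec_sequenceMaker l r out) := by unfold Spec_sequenceMaker; infer_instance

-- ===== CLAIM (what is proved, stated in full; the proofs are below) =====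
def Claim_equal_sequenceMaker : Prop := ∀ (l : Int) (r : Int), Dom_sequenceMaker l r → Spec_sequenceMaker l r (sequenceMaker l r)


-- ===== LEMMAS AND PROOFS =====

-- PySem's Python-exact bxor agrees with Mathlib's Int.xor
theorem bxor_eq_xor (a b : Int) : PySem.Int.bxor a b = Int.xor a b := by
  unfold PySem.Int.bxor
  cases a with
  | ofNat m =>
    cases b with
    | ofNat n => simp [Int.xor]
    | negSucc n =>
      simp only [Int.xor]
      norm_num [Int.negSucc_eq]
      omega
  | negSucc m =>
    cases b with
    | ofNat n =>
      simp only [Int.xor]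
      norm_num [Int.negSucc_eq]
      omega
    | negSucc n =>
      simp only [Int.xor]
      norm_num [Int.negSucc_eq]
      omega

theorem ixor_assoc (a b c : Int) : Int.xor (Int.xor a b) c = Int.xor a (Int.xor b c) := by
  cases a <;> cases b <;> cases c <;> simp [Int.xor, Nat.xor_assoc]

theorem ixor_comm (a b : Int) : Int.xor a b = Int.xor b a := by
  cases a <;> cases b <;> simp [Int.xor, Nat.xor_comm]

theorem ixor_self (a : Int) : Int.xor a a = 0 := by
  cases a <;> simp [Int.xor]

theorem ixor_zero (a : Int) : Int.xor a 0 = a := by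
  cases a <;> simp [Int.xor]

theorem zero_ixor (a : Int) : Int.xor 0 a = a := by
  rw [ixor_comm, ixor_zero]

theorem nxor_even_one (k : Nat) : (2*k) ^^^ 1 = 2*k + 1 := by
  apply Nat.eq_of_testBit_eq
  intro i
  cases i with
  | zero => simp [Nat.mul_comm]
  | succ j => simp [Nat.testBit_succ, Nat.mul_comm]

theorem nxor_odd_one (k : Nat) : (2*k+1) ^^^ 1 = 2*k := by
  apply Nat.eq_of_testBit_eq
  intro i
  simp only [Nat.testBit_xor]
  cases i with
  | zero =>
    rw [Nat.testBit_zero, Nat.testBit_zero, Nat.testBit_zero]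
    rw [show (2*k+1) % 2 = 1 from by omega, show (1:Nat) % 2 = 1 from rfl, show (2*k) % 2 = 0 from by omega]
    decide
  | succ j =>
    rw [Nat.testBit_succ, Nat.testBit_succ, Nat.testBit_succ]
    rw [show (2*k+1)/2 = k from by omega, show (1:Nat)/2 = 0 from rfl, show (2*k)/2 = k from by omega]
    simp

theorem nxor_l2a (a : Nat) : (4*a+1) ^^^ (4*a+3) = 2 := by
  apply Nat.eq_of_testBit_eq
  intro i
  simp only [Nat.testBit_xor]
  match i with
  | 0 =>
    rw [Nat.testBit_zero, Nat.testBit_zero, Nat.testBit_zero]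
    rw [show (4*a+1) % 2 = 1 from by omega, show (4*a+3) % 2 = 1 from by omega]
    decide
  | 1 =>
    rw [Nat.testBit_succ, Nat.testBit_succ, Nat.testBit_succ,
        Nat.testBit_zero, Nat.testBit_zero, Nat.testBit_zero]
    rw [show (4*a+1)/2 = 2*a from by omega, show (4*a+3)/2 = 2*a+1 from by omega]
    rw [show (2*a) % 2 = 0 from by omega, show (2*a+1) % 2 = 1 from by omega]
    decide
  | (j+2) =>
    rw [Nat.testBit_succ, Nat.testBit_succ, Nat.testBit_succ,
        Nat.testBit_succ, Nat.testBit_succ, Nat.testBit_succ]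
    rw [show (4*a+1)/2/2 = a from by omega, show (4*a+3)/2/2 = a from by omega,
        show (2:Nat)/2/2 = 0 from rfl]
    simp

theorem nxor_l2b (a : Nat) : (4*a+2) ^^^ (4*a) = 2 := by
  apply Nat.eq_of_testBit_eq
  intro i
  simp only [Nat.testBit_xor]
  match i with
  | 0 =>
    rw [Nat.testBit_zero, Nat.testBit_zero, Nat.testBit_zero]
    rw [show (4*a+2) % 2 = 0 from by omega, show (4*a) % 2 = 0 from by omega]
    decide
  | 1 =>
    rw [Nat.testBit_succ, Nat.testBit_succ, Nat.testBit_succ,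
        Nat.testBit_zero, Nat.testBit_zero, Nat.testBit_zero]
    rw [show (4*a+2)/2 = 2*a+1 from by omega, show (4*a)/2 = 2*a from by omega]
    rw [show (2*a+1) % 2 = 1 from by omega, show (2*a) % 2 = 0 from by omega]
    decide
  | (j+2) =>
    rw [Nat.testBit_succ, Nat.testBit_succ, Nat.testBit_succ,
        Nat.testBit_succ, Nat.testBit_succ, Nat.testBit_succ]
    rw [show (4*a+2)/2/2 = a from by omega, show (4*a)/2/2 = a from by omega,
        show (2:Nat)/2/2 = 0 from rfl]
    simp

-- flip the low bit of a multiple of 4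
theorem L1 (n : Int) (h : n % 4 = 0) : Int.xor n 1 = n + 1 := by
  cases n with
  | ofNat m =>
    rw [Int.ofNat_eq_natCast] at h
    have hm : ∃ k, m = 2*k := ⟨m/2, by omega⟩
    obtain ⟨k, rfl⟩ := hm
    simp only [Int.xor, show (1:Int) = Int.ofNat 1 from rfl]
    rw [nxor_even_one]
    rfl
  | negSucc m =>
    rw [Int.negSucc_eq] at h
    have hm : ∃ k, m = 2*k+1 := ⟨m/2, by omega⟩
    obtain ⟨k, rfl⟩ := hm
    simp only [show (1:Int) = Int.ofNat 1 from rfl, Int.xor]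
    rw [nxor_odd_one]
    simp [Int.negSucc_eq]

theorem L2 (n : Int) (h : n % 4 = 1) : Int.xor n (n + 2) = 2 := by
  cases n with
  | ofNat m =>
    rw [Int.ofNat_eq_natCast] at h
    have hm : ∃ a, m = 4*a+1 := ⟨m/4, by omega⟩
    obtain ⟨a, rfl⟩ := hm
    have h2 : (Int.ofNat (4*a+1)) + 2 = Int.ofNat (4*a+3) := by simp; omega
    rw [h2]
    simp only [Int.xor]
    rw [nxor_l2a]
    rfl
  | negSucc m =>
    rw [Int.negSucc_eq] at h
    have hm : ∃ a, m = 4*a+2 := ⟨m/4, by omega⟩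
    obtain ⟨a, rfl⟩ := hm
    have h2 : (Int.negSucc (4*a+2)) + 2 = Int.negSucc (4*a) := by simp [Int.negSucc_eq]; omega
    rw [h2]
    simp only [Int.xor]
    rw [nxor_l2b]
    rfl

-- emod-phrased twins of A's loop-body table and of B's closed-form prefix value
def tT (n : Int) : Int :=
  if n % 4 = 0 then n else if n % 4 = 1 then 1 else if n % 4 = 2 then n + 1 else 0

def gG (n : Int) : Int :=
  Int.xor (if (n / 4) % 2 = 1 then 2 else 0) (if n % 4 < 2 then n else 2)

theorem altT_eq (n : Int) : altT n = tT n := by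
  simp [altT, tT, PySem.Int.mod_eq_emod_of_pos (show (0:Int) < 4 by norm_num)]

theorem altG_eq (n : Int) : altG n = gG n := by
  simp [altG, gG, bxor_eq_xor,
    PySem.Int.mod_eq_emod_of_pos (show (0:Int) < 4 by norm_num),
    PySem.Int.mod_eq_emod_of_pos (show (0:Int) < 2 by norm_num),
    PySem.Int.floordiv_eq_ediv_of_pos (show (0:Int) < 4 by norm_num)]

theorem stepLem (x i : Int) : seqStep x i = Int.xor x (tT i) := by
  unfold seqStep tT
  rw [PySem.Int.mod_eq_emod_of_pos (show (0:Int) < 4 by norm_num)]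
  simp only [bxor_eq_xor]
  split_ifs <;> first | rfl | omega

theorem whileLem (l : Int) : seqWhile 4 l 0 = (l - l % 4, l % 4) := by
  have e : ∀ a : Int, PySem.Int.mod a 4 = a % 4 :=
    fun a => PySem.Int.mod_eq_emod_of_pos (by norm_num)
  have h : l % 4 = 0 ∨ l % 4 = 1 ∨ l % 4 = 2 ∨ l % 4 = 3 := by omega
  rcases h with h | h | h | h
  · simp [seqWhile, e, h]
  · simp [seqWhile, e, h, show (l-1) % 4 = 0 by omega, Prod.ext_iff]
  · simp [seqWhile, e, h, show (l-1) % 4 = 1 by omega, show (l-1-1) % 4 = 0 by omega,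
      Prod.ext_iff]
    omega
  · simp [seqWhile, e, h, show (l-1) % 4 = 2 by omega, show (l-1-1) % 4 = 1 by omega,
      show (l-1-1-1) % 4 = 0 by omega, Prod.ext_iff]
    omega

theorem initLem (l : Int) :
    (if l % 4 = 0 then l - l % 4
     else if l % 4 = 1 then 1
     else if l % 4 = 2 then (l - l % 4) + 3
     else if l % 4 = 3 then 0 else 0) = tT l := by
  unfold tT
  have h : l % 4 = 0 ∨ l % 4 = 1 ∨ l % 4 = 2 ∨ l % 4 = 3 := by omega
  rcases h with h | h | h | h <;> simp [h] <;> omega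

theorem gstep (n : Int) : gG (n+1) = Int.xor (gG n) (tT (n+1)) := by
  unfold gG tT
  have h : n % 4 = 0 ∨ n % 4 = 1 ∨ n % 4 = 2 ∨ n % 4 = 3 := by omega
  rcases h with h | h | h | h
  · rw [show (n+1) % 4 = 1 by omega, show (n+1) / 4 = n / 4 by omega]
    simp [h]
    rw [ixor_assoc, L1 n h]
  · rw [show (n+1) % 4 = 2 by omega, show (n+1) / 4 = n / 4 by omega]
    simp [h]
    rw [ixor_assoc, show n + 1 + 1 = n + 2 by ring, L2 n h]
  · rw [show (n+1) % 4 = 3 by omega, show (n+1) / 4 = n / 4 by omega]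
    simp [h]
    rw [ixor_zero]
  · rw [show (n+1) % 4 = 0 by omega, show (n+1) / 4 = n / 4 + 1 by omega]
    simp [h]
    have hq : n / 4 % 2 = 0 ∨ n / 4 % 2 = 1 := by omega
    rcases hq with hq | hq
    · simp [hq, show (n/4+1) % 2 = 1 by omega, zero_ixor]
    · simp [hq, show (n/4+1) % 2 = 0 by omega, ixor_self, zero_ixor]

theorem helperA (x a b : Int) : Int.xor (Int.xor x (Int.xor a b)) a = Int.xor x b := by
  rw [ixor_assoc, ixor_assoc, ixor_comm b a, ← ixor_assoc a a b, ixor_self, zero_ixor]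

theorem helperB (x a g c : Int) :
    Int.xor (Int.xor (Int.xor x a) g) c = Int.xor (Int.xor x (Int.xor a c)) g := by
  rw [ixor_assoc, ixor_assoc, ixor_assoc, ixor_assoc, ixor_comm g c]

theorem foldLem (n : Nat) (l : Int) (x : Int) :
    (PySem.List.pyRange (l + 1) (l + 1 + (n : Int))).foldl seqStep x =
      if n = 0 then x else Int.xor (Int.xor x (gG (l + (n : Int)))) (gG l) := by
  induction n generalizing x with
  | zero =>
    rw [show l + 1 + ((0:Nat) : Int) = l + 1 by simp, PySem.List.pyRange_one_eq_nil le_rfl]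
    simp
  | succ k ih =>
    rw [show l + 1 + ((k+1 : Nat) : Int) = (l + 1 + (k : Int)) + 1 by push_cast; ring,
      PySem.List.pyRange_one_succ_right (by omega : l + 1 ≤ l + 1 + (k : Int)),
      List.foldl_append, List.foldl_cons, List.foldl_nil, ih, stepLem,
      show l + 1 + (k : Int) = l + (k : Int) + 1 by ring,
      show l + ((k+1 : Nat) : Int) = l + (k : Int) + 1 by push_cast; ring,
      if_neg (Nat.succ_ne_zero k)]
    by_cases hk : k = 0
    · subst hk
      rw [if_pos rfl, show l + ((0:Nat) : Int) + 1 = l + 1 by simp, gstep l, helperA]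
    · rw [if_neg hk, gstep (l + (k : Int)), helperB]

-- ===== VERDICT (by name: the statement is the Claim_ definition above) =====
theorem sequenceMaker_spec : Claim_equal_sequenceMaker := by
  intro l r _hdom
  unfold Spec_sequenceMaker
  have hA : sequenceMaker l r = (PySem.List.pyRange (l + 1) (r + 1)).foldl seqStep (tT l) := by
    unfold sequenceMaker
    rw [whileLem]
    simp only []
    rw [initLem, show l - l % 4 + l % 4 + 1 = l + 1 by ring]
  rw [hA]
  unfold sequenceMaker_alt
  by_cases hrl : r > l
  · rw [if_pos hrl]
    have hn : r + 1 = l + 1 + ((r - l).toNat : Int) := by omega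
    rw [hn, foldLem, if_neg (by omega : ¬ (r - l).toNat = 0),
      show l + ((r - l).toNat : Int) = r by omega,
      altT_eq, altG_eq, altG_eq, bxor_eq_xor, bxor_eq_xor]
  · rw [if_neg hrl, PySem.List.pyRange_one_eq_nil (by omega : r + 1 ≤ l + 1),
      List.foldl_nil, altT_eq]
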